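-- pv_equiv track=rewrite | github.com/janbarendse/BAB-printerhub | bridge/salesbook/sales_book_generator.py | _find_nkk_bounds
-- ===== SOURCE A (Python) =====
-- def _find_nkk_bounds(records):
--     nkk_values = [record["nkk"] for record in records if record.get("nkk")]
--     if not nkk_values:
--         return "", ""
--     numeric_values = [n for n in nkk_values if n.isdigit()]
--     if numeric_values:
--         return min(numeric_values), max(numeric_values)
--     return min(nkk_values), max(nkk_values)
-- ===== SOURCE B (Python) =====
-- def _find_nkk_bounds(records):
--     all_lo = all_hi = None
--     num_lo = num_hi = None
--     for record in records:
--         n = record.get("nkk")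
--         if not n:
--             continue
--         if all_lo is None:
--             all_lo = all_hi = n
--         else:
--             if n < all_lo:
--                 all_lo = n
--             if all_hi < n:
--                 all_hi = n
--         if n.isdigit():
--             if num_lo is None:
--                 num_lo = num_hi = n
--             else:
--                 if n < num_lo:
--                     num_lo = n
--                 if num_hi < n:
--                     num_hi = n
--     if num_lo is not None:
--         return num_lo, num_hi
--     if all_lo is not None:
--         return all_lo, all_hi
--     return "", ""
-- ===== Notes on version B (the rewrite author's own statement) =====
-- stated objective: alternative
-- what changed: Replaced the two intermediate list comprehensions plus up-to-four min/max reductions by a single pass over records maintaining running lexicographic min/max for all nkk values and for the numeric ones.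
import Mathlib
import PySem

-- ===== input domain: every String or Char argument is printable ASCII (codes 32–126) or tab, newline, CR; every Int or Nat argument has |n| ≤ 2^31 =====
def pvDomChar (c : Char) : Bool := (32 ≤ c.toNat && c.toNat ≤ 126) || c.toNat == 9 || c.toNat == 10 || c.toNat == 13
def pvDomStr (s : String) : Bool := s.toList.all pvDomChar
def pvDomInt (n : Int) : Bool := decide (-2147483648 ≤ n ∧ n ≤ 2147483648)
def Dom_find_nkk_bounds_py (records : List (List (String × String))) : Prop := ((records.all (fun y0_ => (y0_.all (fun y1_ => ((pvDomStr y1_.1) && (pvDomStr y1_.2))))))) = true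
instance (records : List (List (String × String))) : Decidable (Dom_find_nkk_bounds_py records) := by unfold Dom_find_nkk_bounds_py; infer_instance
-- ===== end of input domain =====

-- One honest line: B replaces A's comprehensions + min/max reductions by a single
-- running-min/max pass over records (alternative decomposition, same asymptotic cost).
-- Both programs only read their argument; return-value equivalence is what is proved.

-- ===== PORT A =====
-- record.get("nkk") : first-match association-list lookup (Python dict)
def pvGetNkk (r : List (String × String)) : Option String :=
  (PySem.Dict.mk r).get? "nkk"

-- [record["nkk"] for record in records if record.get("nkk")]
-- (the guard guarantees the key is present and non-empty, so the getD "" in the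
--  map is never the default; truthiness of an Optional[str] = some non-empty string)
def pvNkkValues (records : List (List (String × String))) : List String :=
  (records.filter (fun r => (pvGetNkk r).getD "" ≠ "")).map (fun r => (pvGetNkk r).getD "")

def find_nkk_bounds_py (records : List (List (String × String))) : String × String :=
  let nkk_values := pvNkkValues records
  if nkk_values = [] then ("", "")
  else
    let numeric_values := nkk_values.filter (fun n => PySem.Str.strIsdigit n)
    if numeric_values ≠ [] then
      ((PySem.List.min? numeric_values (fun y => y)).getD "",
       (PySem.List.max? numeric_values (fun y => y)).getD "")
    else
      ((PySem.List.min? nkk_values (fun y => y)).getD "",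
       (PySem.List.max? nkk_values (fun y => y)).getD "")

-- ===== PORT B =====
-- running (lo, hi) pair updated with strict comparisons, as in Source B
def pvUpd (st : Option (String × String)) (n : String) : Option (String × String) :=
  match st with
  | none => some (n, n)
  | some (lo, hi) => some ((if n < lo then n else lo), (if hi < n then n else hi))

def pvStep (st : Option (String × String) × Option (String × String))
    (r : List (String × String)) : Option (String × String) × Option (String × String) :=
  match (PySem.Dict.mk r).get? "nkk" with
  | none => st
  | some n =>
    if n = "" then st
    else
      (pvUpd st.1 n, if PySem.Str.strIsdigit n then pvUpd st.2 n else st.2)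

def find_nkk_bounds_py_alt (records : List (List (String × String))) : String × String :=
  match records.foldl pvStep (none, none) with
  | (_, some b) => b
  | (some b, none) => b
  | (none, none) => ("", "")

-- ===== PRECONDITION & SPEC =====
def Spec_find_nkk_bounds_py (records : List (List (String × String))) (out : String × String) : Prop := out = find_nkk_bounds_py_alt records
instance (records : List (List (String × String))) (out : String × String) : Decidable (Spec_find_nkk_bounds_py records out) := by unfold Spec_find_nkk_bounds_py; infer_instance

-- ===== CLAIM (what is proved, stated in full; the proofs are below) =====
def Claim_equal_find_nkk_bounds_py : Prop := ∀ (records : List (List (String × String))), Dom_find_nkk_bounds_py records → Spec_find_nkk_bounds_py records (find_nkk_bounds_py records)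

-- ===== LEMMAS AND PROOFS =====

-- A's comprehension, one record at a time
lemma pvNkkValues_cons (r : List (String × String)) (t : List (List (String × String))) :
    pvNkkValues (r :: t) =
      if (pvGetNkk r).getD "" = "" then pvNkkValues t
      else ((pvGetNkk r).getD "") :: pvNkkValues t := by
  simp only [pvNkkValues, List.filter_cons]
  split_ifs with h₁ h₂ h₂ <;> simp_all

-- the per-record fold of B is the per-value fold over A's comprehension output
lemma foldl_step_eq (records : List (List (String × String)))
    (st : Option (String × String) × Option (String × String)) :
    records.foldl pvStep st =
      (pvNkkValues records).foldl
        (fun st n => (pvUpd st.1 n, if PySem.Str.strIsdigit n then pvUpd st.2 n else st.2)) st := by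
  induction records generalizing st with
  | nil => rfl
  | cons r t ih =>
    rw [List.foldl_cons, pvNkkValues_cons]
    cases h : (PySem.Dict.mk r).get? "nkk" with
    | none =>
      have hs : pvStep st r = st := by simp [pvStep, h]
      rw [hs]
      simp only [pvGetNkk, h, Option.getD_none, reduceIte]
      exact ih st
    | some n =>
      by_cases hn : n = ""
      · have hs : pvStep st r = st := by simp [pvStep, h, hn]
        rw [hs]
        simp only [pvGetNkk, h, Option.getD_some, if_pos hn]
        exact ih st
      · have hs : pvStep st r =
            (pvUpd st.1 n, if PySem.Str.strIsdigit n then pvUpd st.2 n else st.2) := by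
          simp [pvStep, h, hn]
        rw [hs]
        simp only [pvGetNkk, h, Option.getD_some, if_neg hn, List.foldl_cons]
        exact ih _

-- the paired fold splits into two independent running-bound folds
lemma foldl_pair_split (vs : List String)
    (a b : Option (String × String)) :
    vs.foldl (fun st n => (pvUpd st.1 n, if PySem.Str.strIsdigit n then pvUpd st.2 n else st.2)) (a, b) =
      (vs.foldl pvUpd a, (vs.filter (fun n => PySem.Str.strIsdigit n)).foldl pvUpd b) := by
  induction vs generalizing a b with
  | nil => rfl
  | cons n t ih =>
    by_cases hd : PySem.Str.strIsdigit n = true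
    · simp only [List.foldl_cons, List.filter_cons, hd, if_true]
      exact ih _ _
    · have hd' : PySem.Str.strIsdigit n = false := by
        cases h : PySem.Str.strIsdigit n <;> simp_all
      simp only [List.foldl_cons, List.filter_cons, hd', Bool.false_eq_true, if_false]
      exact ih _ _

lemma if_lt_eq_min (a n : String) : (if n < a then n else a) = min a n := by
  rcases lt_or_ge n a with h | h
  · rw [if_pos h, min_eq_right h.le]
  · rw [if_neg (not_lt.mpr h), min_eq_left h]

lemma if_lt_eq_max (a n : String) : (if a < n then n else a) = max a n := by
  rcases lt_or_ge a n with h | h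
  · rw [if_pos h, max_eq_right h.le]
  · rw [if_neg (not_lt.mpr h), max_eq_left h]

-- the running-bound fold computes (foldl min, foldl max)
lemma foldl_upd_some (vs : List String) (lo hi : String) :
    vs.foldl pvUpd (some (lo, hi)) = some (vs.foldl min lo, vs.foldl max hi) := by
  induction vs generalizing lo hi with
  | nil => rfl
  | cons n t ih =>
    simp only [List.foldl_cons, pvUpd, if_lt_eq_min, if_lt_eq_max]
    exact ih _ _

lemma foldl_upd_none (vs : List String) :
    vs.foldl pvUpd none =
      match vs with
      | [] => none
      | x :: t => some (t.foldl min x, t.foldl max x) := by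
  cases vs with
  | nil => rfl
  | cons x t =>
    simp only [List.foldl_cons]
    show t.foldl pvUpd (some (x, x)) = _
    exact foldl_upd_some t x x

-- ===== VERDICT (by name: the statement is the Claim_ definition above) =====
theorem find_nkk_bounds_py_spec : Claim_equal_find_nkk_bounds_py := by
  intro records _
  show find_nkk_bounds_py records = find_nkk_bounds_py_alt records
  unfold find_nkk_bounds_py find_nkk_bounds_py_alt
  rw [foldl_step_eq, foldl_pair_split, foldl_upd_none, foldl_upd_none]
  cases hv : pvNkkValues records with
  | nil => simp
  | cons x t =>
    simp only [ne_eq, reduceCtorEq, if_false, List.filter_cons]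
    by_cases hx : PySem.Str.strIsdigit x = true
    · simp only [hx, if_true]
      simp [PySem.List.min?_id_cons, PySem.List.max?_id_cons]
    · simp only [hx, Bool.false_eq_true, if_false]
      cases hf : t.filter (fun n => PySem.Str.strIsdigit n) with
      | nil =>
        simp [PySem.List.min?_id_cons, PySem.List.max?_id_cons]
      | cons y u =>
        simp [PySem.List.min?_id_cons, PySem.List.max?_id_cons]
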